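-- pv_equiv track=rewrite | github.com/TheKwisatzHaderach/WWVB-Research | crossfunc.py | expectedSignal
-- ===== SOURCE A (Python) =====
-- def expectedSignal(hoursS, minutesS, Zero, One, X):
--     wwvbExpected = []
--
--     wwvbExpected = wwvbExpected + X #0 Second
--     for min in minutesS:
--         if min == '0':
--             wwvbExpected = wwvbExpected + Zero
--         else:
--             wwvbExpected = wwvbExpected + One
--     wwvbExpected = wwvbExpected + X # 9 Second
--     wwvbExpected = wwvbExpected + Zero
--     wwvbExpected = wwvbExpected + Zero
--     for hour in hoursS:
--         if hour == '0':
--             wwvbExpected = wwvbExpected + Zero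
--         else:
--             wwvbExpected = wwvbExpected + One
--     wwvbExpected = wwvbExpected + X #19 Second
--     wwvbExpected = wwvbExpected + Zero
--     wwvbExpected = wwvbExpected + Zero
--
--     #Day of the year 233 :22 - :33
--     wwvbExpected = wwvbExpected + One
--     wwvbExpected = wwvbExpected + Zero
--     wwvbExpected = wwvbExpected + Zero
--     wwvbExpected = wwvbExpected + Zero
--     wwvbExpected = wwvbExpected + Zero
--     wwvbExpected = wwvbExpected + One
--     wwvbExpected = wwvbExpected + One
--     wwvbExpected = wwvbExpected + X #29 Second
--
--     wwvbExpected = wwvbExpected + Zero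
--     wwvbExpected = wwvbExpected + Zero
--     wwvbExpected = wwvbExpected + One
--     wwvbExpected = wwvbExpected + One
--     wwvbExpected = wwvbExpected + Zero
--     wwvbExpected = wwvbExpected + Zero
--     wwvbExpected = wwvbExpected + One #36
--     wwvbExpected = wwvbExpected + Zero
--     wwvbExpected = wwvbExpected + One
--     wwvbExpected = wwvbExpected + X #39 Second
--
--     wwvbExpected = wwvbExpected + Zero
--     wwvbExpected = wwvbExpected + Zero
--     wwvbExpected = wwvbExpected + One
--     wwvbExpected = wwvbExpected + One
--     wwvbExpected = wwvbExpected + Zero #44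
--     wwvbExpected = wwvbExpected + Zero
--     wwvbExpected = wwvbExpected + Zero
--     wwvbExpected = wwvbExpected + Zero
--     wwvbExpected = wwvbExpected + One
--     wwvbExpected = wwvbExpected + X #49 Second
--
--     wwvbExpected = wwvbExpected + Zero
--     wwvbExpected = wwvbExpected + One
--     wwvbExpected = wwvbExpected + One
--     wwvbExpected = wwvbExpected + One
--     wwvbExpected = wwvbExpected + Zero #54
--     wwvbExpected = wwvbExpected + Zero
--     wwvbExpected = wwvbExpected + Zero
--     wwvbExpected = wwvbExpected + One
--     wwvbExpected = wwvbExpected + One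
--     wwvbExpected = wwvbExpected + X #59 Second
--
--     return wwvbExpected
-- ===== SOURCE B (Python) =====
-- def expectedSignal(hoursS, minutesS, Zero, One, X):
--     bits = lambda s: ''.join('0' if c == '0' else '1' for c in s)
--     template = ('X' + bits(minutesS) + 'X00' + bits(hoursS)
--                 + 'X001000011X001100101X001100001X011100011X')
--     table = {'0': Zero, '1': One, 'X': X}
--     out = []
--     for sym in template:
--         out.extend(table[sym])
--     return out
-- ===== Notes on version B (the rewrite author's own statement) =====
-- stated objective: simpler
-- what changed: Replaced ~50 inline branchy list+list concatenations (quadratic copying) with a single '0'/'1'/'X' symbol template (minute/hour bits spliced between fixed segments) expanded once by a table-driven pass extending the output in place.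
import Mathlib
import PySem

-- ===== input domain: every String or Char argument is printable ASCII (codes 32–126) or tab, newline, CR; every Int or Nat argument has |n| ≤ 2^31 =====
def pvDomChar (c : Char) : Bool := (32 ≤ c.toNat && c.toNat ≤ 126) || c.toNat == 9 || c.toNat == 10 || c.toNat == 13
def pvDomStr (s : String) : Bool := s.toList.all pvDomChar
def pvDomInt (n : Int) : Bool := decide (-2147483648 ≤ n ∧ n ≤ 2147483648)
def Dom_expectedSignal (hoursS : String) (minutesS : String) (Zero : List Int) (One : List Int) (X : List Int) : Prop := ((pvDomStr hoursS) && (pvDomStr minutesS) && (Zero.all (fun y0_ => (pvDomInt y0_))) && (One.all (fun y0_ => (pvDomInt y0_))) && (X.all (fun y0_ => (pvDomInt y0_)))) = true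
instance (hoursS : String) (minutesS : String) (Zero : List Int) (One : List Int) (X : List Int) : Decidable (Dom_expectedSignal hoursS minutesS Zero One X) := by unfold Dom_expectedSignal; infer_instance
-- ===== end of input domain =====

-- B replaces A's ~50 inline branchy list concatenations with one symbol template ('0'/'1'/'X')
-- expanded in a single table-driven pass (objective: simpler, data-driven).

-- ===== PORT A =====
-- literal transliteration of Source A: repeated `wwvbExpected = wwvbExpected + …` statements
def expectedSignal (hoursS : String) (minutesS : String) (Zero : List Int) (One : List Int) (X : List Int) : List Int :=
  let w : List Int := []
  let w := w ++ X                                       -- 0 Second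
  let w := minutesS.toList.foldl
    (fun acc min => if min = '0' then acc ++ Zero else acc ++ One) w
  let w := w ++ X                                       -- 9 Second
  let w := w ++ Zero
  let w := w ++ Zero
  let w := hoursS.toList.foldl
    (fun acc hour => if hour = '0' then acc ++ Zero else acc ++ One) w
  let w := w ++ X                                       -- 19 Second
  let w := w ++ Zero
  let w := w ++ Zero
  -- Day of the year 233 :22 - :33
  let w := w ++ One
  let w := w ++ Zero
  let w := w ++ Zero
  let w := w ++ Zero
  let w := w ++ Zero
  let w := w ++ One
  let w := w ++ One
  let w := w ++ X                                       -- 29 Second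
  let w := w ++ Zero
  let w := w ++ Zero
  let w := w ++ One
  let w := w ++ One
  let w := w ++ Zero
  let w := w ++ Zero
  let w := w ++ One                                     -- 36
  let w := w ++ Zero
  let w := w ++ One
  let w := w ++ X                                       -- 39 Second
  let w := w ++ Zero
  let w := w ++ Zero
  let w := w ++ One
  let w := w ++ One
  let w := w ++ Zero                                    -- 44
  let w := w ++ Zero
  let w := w ++ Zero
  let w := w ++ Zero
  let w := w ++ One
  let w := w ++ X                                       -- 49 Second
  let w := w ++ Zero
  let w := w ++ One
  let w := w ++ One
  let w := w ++ One
  let w := w ++ Zero                                    -- 54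
  let w := w ++ Zero
  let w := w ++ Zero
  let w := w ++ One
  let w := w ++ One
  let w := w ++ X                                       -- 59 Second
  w

-- ===== PORT B =====
-- bits(s): map each char to '0'/'1'
def pvBits (s : String) : List Char := s.toList.map (fun c => if c = '0' then '0' else '1')
-- the constant tail string "X001000011X001100101X001100001X011100011X" as chars
def pvTail : List Char := ['X', '0', '0', '1', '0', '0', '0', '0', '1', '1', 'X', '0', '0', '1', '1', '0', '0', '1', '0', '1', 'X', '0', '0', '1', '1', '0', '0', '0', '0', '1', 'X', '0', '1', '1', '1', '0', '0', '0', '1', '1', 'X']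
-- table lookup {'0': Zero, '1': One, 'X': X}
def pvSym (Zero One X : List Int) (sym : Char) : List Int :=
  if sym = '0' then Zero else if sym = '1' then One else X

def expectedSignal_alt (hoursS : String) (minutesS : String) (Zero : List Int) (One : List Int) (X : List Int) : List Int :=
  let template : List Char :=
    ('X' :: pvBits minutesS) ++ ('X' :: '0' :: '0' :: pvBits hoursS) ++ pvTail
  template.foldl (fun out sym => out ++ pvSym Zero One X sym) []

-- ===== PRECONDITION & SPEC =====
def Spec_expectedSignal (hoursS : String) (minutesS : String) (Zero : List Int) (One : List Int) (X : List Int) (out : List Int) : Prop := out = expectedSignal_alt hoursS minutesS Zero One X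
instance (hoursS : String) (minutesS : String) (Zero : List Int) (One : List Int) (X : List Int) (out : List Int) : Decidable (Spec_expectedSignal hoursS minutesS Zero One X out) := by unfold Spec_expectedSignal; infer_instance

-- ===== CLAIM (what is proved, stated in full; the proofs are below) =====
def Claim_equal_expectedSignal : Prop := ∀ (hoursS : String) (minutesS : String) (Zero : List Int) (One : List Int) (X : List Int), Dom_expectedSignal hoursS minutesS Zero One X → Spec_expectedSignal hoursS minutesS Zero One X (expectedSignal hoursS minutesS Zero One X)

-- ===== LEMMAS AND PROOFS =====

-- folding "append g x" equals init ++ flatMap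
theorem foldl_app_flatMap {α : Type} (g : Char → List α) (l : List Char) (init : List α) :
    l.foldl (fun acc s => acc ++ g s) init = init ++ l.flatMap g := by
  induction l generalizing init with
  | nil => simp
  | cons c t ih => simp [ih, List.append_assoc]

-- the mapped bits of a string, pushed through the symbol table, are A's digit choices
theorem flatMap_pvBits (s : String) (Zero One X : List Int) :
    (pvBits s).flatMap (pvSym Zero One X)
      = s.toList.flatMap (fun c => if c = '0' then Zero else One) := by
  unfold pvBits
  induction s.toList with
  | nil => rfl
  | cons c t ih =>
    by_cases h : c = '0' <;> simp [h, pvSym, ih]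

theorem expectedSignal_eq (hoursS minutesS : String) (Zero One X : List Int) :
    expectedSignal hoursS minutesS Zero One X = expectedSignal_alt hoursS minutesS Zero One X := by
  unfold expectedSignal expectedSignal_alt
  have hA : ∀ (s : List Char) (init : List Int),
      s.foldl (fun acc c => if c = '0' then acc ++ Zero else acc ++ One) init
        = init ++ s.flatMap (fun c => if c = '0' then Zero else One) := by
    intro s
    induction s with
    | nil => intro init; simp
    | cons c t ih =>
      intro init
      by_cases h : c = '0' <;> simp [h, ih, List.append_assoc]
  simp only [hA, List.nil_append, foldl_app_flatMap, pvTail, List.flatMap_append,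
    List.flatMap_cons, List.flatMap_nil, flatMap_pvBits]
  simp [pvSym, List.append_assoc]

-- ===== VERDICT (by name: the statement is the Claim_ definition above) =====
theorem expectedSignal_spec : Claim_equal_expectedSignal := by
  intro hoursS minutesS Zero One X _
  unfold Spec_expectedSignal
  exact expectedSignal_eq hoursS minutesS Zero One X
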